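-- pv_equiv track=rewrite | github.com/sunhuaiyu/rosalind | rosalind_ba6h.py | colored_edges
-- ===== SOURCE A (Python) =====
-- def chromosome_to_cycle(chromosome):
--     n = len(chromosome)
--     nodes = [0] * (2 * n + 1)
--     for j in range(1, n+1):
--         i = chromosome[j-1]
--         if i > 0:
--             nodes[2 * j - 1] = 2 * i -1
--             nodes[2 * j] = 2 * i
--         else:
--             nodes[2 * j - 1] = - 2 * i
--             nodes[2 * j] = - 2 * i -1
--     return nodes[1:]
--
-- def colored_edges(P):
--     edges = []
--     for chr in P:
--         nodes = chromosome_to_cycle(chr)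
--         nodes = [0] + nodes + nodes[:1]
--         for j in range(1, len(chr)+1):
--             edges.append((nodes[2 * j], nodes[2 * j + 1]))
--     return edges
-- ===== SOURCE B (Python) =====
-- def _head(i):
--     return 2 * i - 1 if i > 0 else -2 * i
--
-- def _tail(i):
--     return 2 * i if i > 0 else -2 * i - 1
--
-- def colored_edges(P):
--     edges = []
--     for chr in P:
--         if not chr:
--             continue
--         first = chr[0]
--         prev = first
--         for cur in chr[1:]:
--             edges.append((_tail(prev), _head(cur)))
--             prev = cur
--         edges.append((_tail(prev), _head(first)))
--     return edges
-- ===== Notes on version B (the rewrite author's own statement) =====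
-- stated objective: simpler
-- what changed: B walks each chromosome once carrying the previous gene as state, emitting (tail(prev), head(cur)) for each consecutive pair and one closing edge back to the first gene, eliminating A's mutated flat nodes array, the [0]+...+nodes[:1] wrap and all 2j index arithmetic (no indices or modulo at all).
import Mathlib
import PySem

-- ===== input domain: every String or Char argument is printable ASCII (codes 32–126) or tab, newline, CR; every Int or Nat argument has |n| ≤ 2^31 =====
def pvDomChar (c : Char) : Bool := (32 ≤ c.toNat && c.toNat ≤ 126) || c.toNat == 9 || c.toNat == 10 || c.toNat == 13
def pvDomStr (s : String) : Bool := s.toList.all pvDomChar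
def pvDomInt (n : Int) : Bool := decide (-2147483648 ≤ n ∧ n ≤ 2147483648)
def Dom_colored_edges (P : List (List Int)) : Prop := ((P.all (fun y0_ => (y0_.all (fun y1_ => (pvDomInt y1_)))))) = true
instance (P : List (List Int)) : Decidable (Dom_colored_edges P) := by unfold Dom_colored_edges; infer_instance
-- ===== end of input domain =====

-- B walks each chromosome once carrying the previous gene, emitting (tail(prev), head(cur))
-- per consecutive pair plus one closing edge back to the first gene — no nodes array,
-- no [0]+…+nodes[:1] wrap, no indices or modulo (objective: simpler). Proved equal on all inputs.

-- ===== PORT A =====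
-- literal transliteration of chromosome_to_cycle; 'nodes[k] = v' is List.set at the
-- (always nonnegative, in-range) index, 'chromosome[j-1]' (in range for every j the
-- loop produces) is pyGetD with default 0 — exact here since no index is ever out of range.
def chromosome_to_cycle (chromosome : List Int) : List Int :=
  let n : Int := chromosome.length
  let nodes : List Int := List.replicate (2 * chromosome.length + 1) 0
  let nodes := (PySem.List.pyRange 1 (n + 1) 1).foldl (fun nodes j =>
    let i := PySem.List.pyGetD chromosome (j - 1) 0
    if i > 0 then
      (nodes.set (2 * j - 1).toNat (2 * i - 1)).set (2 * j).toNat (2 * i)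
    else
      (nodes.set (2 * j - 1).toNat (-2 * i)).set (2 * j).toNat (-2 * i - 1)) nodes
  nodes.drop 1

def colored_edges (P : List (List Int)) : List (Int × Int) :=
  P.foldl (fun edges chr =>
    let nodes := chromosome_to_cycle chr
    let nodes2 := [0] ++ nodes ++ nodes.take 1
    (PySem.List.pyRange 1 ((chr.length : Int) + 1) 1).foldl (fun es j =>
      es ++ [(PySem.List.pyGetD nodes2 (2 * j) 0, PySem.List.pyGetD nodes2 (2 * j + 1) 0)]) edges) []

-- ===== PORT B =====
def pvHeadB (i : Int) : Int := if i > 0 then 2 * i - 1 else -2 * i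
def pvTailB (i : Int) : Int := if i > 0 then 2 * i else -2 * i - 1

def colored_edges_alt (P : List (List Int)) : List (Int × Int) :=
  P.foldl (fun edges chr =>
    match chr with
    | [] => edges
    | first :: rest =>
      let st := rest.foldl (fun (st : List (Int × Int) × Int) cur =>
        (st.1 ++ [(pvTailB st.2, pvHeadB cur)], cur)) (edges, first)
      st.1 ++ [(pvTailB st.2, pvHeadB first)]) []

-- ===== PRECONDITION & SPEC =====
def Spec_colored_edges (P : List (List Int)) (out : List (Int × Int)) : Prop := out = colored_edges_alt P
instance (P : List (List Int)) (out : List (Int × Int)) : Decidable (Spec_colored_edges P out) := by unfold Spec_colored_edges; infer_instance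

-- ===== CLAIM (what is proved, stated in full; the proofs are below) =====
def Claim_equal_colored_edges : Prop := ∀ (P : List (List Int)), Dom_colored_edges P → Spec_colored_edges P (colored_edges P)

-- ===== LEMMAS AND PROOFS =====

-- the per-element (head, tail) pair and the flattened pair list
def pvPair (i : Int) : Int × Int := if i > 0 then (2 * i - 1, 2 * i) else (-2 * i, -2 * i - 1)

def pvFlat (ps : List (Int × Int)) : List Int := ps.flatMap (fun p => [p.1, p.2])

lemma pvHeadB_eq (i : Int) : pvHeadB i = (pvPair i).1 := by
  by_cases h : i > 0 <;> simp [pvHeadB, pvPair, h]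

lemma pvTailB_eq (i : Int) : pvTailB i = (pvPair i).2 := by
  by_cases h : i > 0 <;> simp [pvTailB, pvPair, h]

lemma pvFlat_length (ps : List (Int × Int)) : (pvFlat ps).length = 2 * ps.length := by
  induction ps with
  | nil => simp [pvFlat]
  | cons p t ih => simp [pvFlat] at ih ⊢; omega

lemma pvFlat_getD_even (ps : List (Int × Int)) (k : ℕ) (hk : k < ps.length) :
    (pvFlat ps).getD (2 * k) 0 = (ps.getD k (0, 0)).1 := by
  induction ps generalizing k with
  | nil => simp at hk
  | cons p t ih =>
    cases k with
    | zero => simp [pvFlat]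
    | succ m =>
      have h2 : 2 * (m + 1) = (2 * m) + 1 + 1 := by omega
      rw [h2]
      simpa [pvFlat] using ih m (by simpa using hk)

lemma pvFlat_getD_odd (ps : List (Int × Int)) (k : ℕ) (hk : k < ps.length) :
    (pvFlat ps).getD (2 * k + 1) 0 = (ps.getD k (0, 0)).2 := by
  induction ps generalizing k with
  | nil => simp at hk
  | cons p t ih =>
    cases k with
    | zero => simp [pvFlat]
    | succ m =>
      have h2 : 2 * (m + 1) + 1 = (2 * m + 1) + 1 + 1 := by omega
      rw [h2]
      simpa [pvFlat] using ih m (by simpa using hk)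

-- setting the two fresh slots right past an already-written prefix
lemma pv_set_step (F : List Int) (t : ℕ) (h tl : Int) :
    ((F ++ List.replicate (2 * t + 2) 0).set F.length h).set (F.length + 1) tl
    = F ++ h :: tl :: List.replicate (2 * t) 0 := by
  have hrep : List.replicate (2 * t + 2) (0 : Int) = 0 :: 0 :: List.replicate (2 * t) 0 := by
    simp [List.replicate_succ]
  rw [hrep]
  rw [List.set_append_right _ _ (le_refl _), Nat.sub_self]
  rw [List.set_append_right _ _ (by omega)]
  simp

-- the chromosome_to_cycle loop: invariant over a pre/rest split of the chromosome
lemma ctc_aux (chr : List Int) (rest : List Int) : ∀ (pre : List Int), chr = pre ++ rest →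
    (PySem.List.pyRange ((pre.length : Int) + 1) ((chr.length : Int) + 1) 1).foldl
      (fun nodes j =>
        let i := PySem.List.pyGetD chr (j - 1) 0
        if i > 0 then
          (nodes.set (2 * j - 1).toNat (2 * i - 1)).set (2 * j).toNat (2 * i)
        else
          (nodes.set (2 * j - 1).toNat (-2 * i)).set (2 * j).toNat (-2 * i - 1))
      (0 :: pvFlat (pre.map pvPair) ++ List.replicate (2 * rest.length) 0)
    = 0 :: pvFlat (chr.map pvPair) := by
  induction rest with
  | nil =>
    intro pre hsplit
    subst hsplit
    rw [PySem.List.pyRange_one_eq_nil (by simp)]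
    simp
  | cons i t ih =>
    intro pre hsplit
    have hlen : chr.length = pre.length + t.length + 1 := by simp [hsplit]; omega
    rw [PySem.List.pyRange_one_cons (by push_cast [hlen]; omega)]
    rw [List.foldl_cons]
    have hget : PySem.List.pyGetD chr ((pre.length : Int) + 1 - 1) 0 = i := by
      have h1 : (pre.length : Int) + 1 - 1 = ((pre.length : ℕ) : Int) := by ring
      rw [h1, PySem.List.pyGetD_natCast]
      simp [hsplit, List.getD]
    have hidx1 : (2 * ((pre.length : Int) + 1) - 1).toNat = (0 :: pvFlat (pre.map pvPair)).length := by
      simp [pvFlat_length]; omega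
    have hidx2 : (2 * ((pre.length : Int) + 1)).toNat = (0 :: pvFlat (pre.map pvPair)).length + 1 := by
      simp [pvFlat_length]; omega
    have hrep : 2 * (i :: t).length = 2 * t.length + 2 := by simp; omega
    have h2 := ih (pre ++ [i]) (by simp [hsplit])
    simp only [List.length_append, List.length_singleton, Nat.cast_add, Nat.cast_one] at h2
    refine Eq.trans ?_ h2
    congr 1
    simp only [hget, hrep]
    by_cases hpos : i > 0
    · rw [if_pos hpos, hidx1, hidx2, pv_set_step]
      simp [pvFlat, pvPair, hpos]
    · rw [if_neg hpos, hidx1, hidx2, pv_set_step]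
      simp [pvFlat, pvPair, hpos]

lemma ctc_eq (chr : List Int) :
    chromosome_to_cycle chr = pvFlat (chr.map pvPair) := by
  have h := ctc_aux chr chr [] (by simp)
  simp only [List.length_nil, Nat.cast_zero, zero_add] at h
  have hinit : List.replicate (2 * chr.length + 1) (0 : Int)
      = 0 :: pvFlat (([] : List Int).map pvPair) ++ List.replicate (2 * chr.length) 0 := by
    simp [pvFlat, List.replicate_succ]
  unfold chromosome_to_cycle
  simp only [hinit]
  rw [h]
  simp

-- getD through the wrapped nodes list [0] ++ flat ++ flat.take 1
lemma pv_edge_fst (chr : List Int) (k : ℕ) (hk : k < chr.length) :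
    PySem.List.pyGetD ([0] ++ pvFlat (chr.map pvPair) ++ (pvFlat (chr.map pvPair)).take 1)
      (2 * (1 + (k : Int))) 0
    = ((chr.map pvPair).getD k (0, 0)).2 := by
  have hcast : 2 * (1 + (k : Int)) = ((2 * k + 2 : ℕ) : Int) := by push_cast; ring
  rw [hcast, PySem.List.pyGetD_natCast]
  have hlt : 2 * k + 1 < (pvFlat (chr.map pvPair)).length := by
    rw [pvFlat_length]; simp; omega
  rw [List.getD_eq_getElem?_getD, List.append_assoc]
  rw [List.getElem?_append_right (by simp : ([0] : List Int).length ≤ 2 * k + 2)]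
  have hi : 2 * k + 2 - ([0] : List Int).length = 2 * k + 1 := by simp
  rw [hi, List.getElem?_append_left hlt, ← List.getD_eq_getElem?_getD]
  rw [pvFlat_getD_odd _ k (by simpa using hk)]

lemma pv_edge_snd (chr : List Int) (k : ℕ) (hk : k < chr.length) :
    PySem.List.pyGetD ([0] ++ pvFlat (chr.map pvPair) ++ (pvFlat (chr.map pvPair)).take 1)
      (2 * (1 + (k : Int)) + 1) 0
    = ((chr.map pvPair).getD ((k + 1) % chr.length) (0, 0)).1 := by
  have hcast : 2 * (1 + (k : Int)) + 1 = ((2 * k + 3 : ℕ) : Int) := by push_cast; ring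
  rw [hcast, PySem.List.pyGetD_natCast]
  have hflen : (pvFlat (chr.map pvPair)).length = 2 * chr.length := by
    rw [pvFlat_length]; simp
  rw [List.getD_eq_getElem?_getD, List.append_assoc]
  rw [List.getElem?_append_right (by simp : ([0] : List Int).length ≤ 2 * k + 3)]
  have hi : 2 * k + 3 - ([0] : List Int).length = 2 * k + 2 := by simp
  rw [hi]
  by_cases hlast : k + 1 < chr.length
  · have hlt : 2 * k + 2 < (pvFlat (chr.map pvPair)).length := by rw [hflen]; omega
    rw [List.getElem?_append_left hlt, ← List.getD_eq_getElem?_getD]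
    have h2 : 2 * k + 2 = 2 * (k + 1) := by ring
    rw [h2, pvFlat_getD_even _ (k + 1) (by simpa using hlast), Nat.mod_eq_of_lt hlast]
  · have hk1 : k + 1 = chr.length := by omega
    have hge : (pvFlat (chr.map pvPair)).length ≤ 2 * k + 2 := by rw [hflen]; omega
    rw [List.getElem?_append_right hge]
    have hsub : 2 * k + 2 - (pvFlat (chr.map pvPair)).length = 0 := by rw [hflen]; omega
    rw [hsub]
    have hne : 0 < (pvFlat (chr.map pvPair)).length := by rw [hflen]; omega
    rw [List.getElem?_take_of_lt (by omega)]
    have hmod : (k + 1) % chr.length = 0 := by rw [hk1, Nat.mod_self]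
    rw [hmod, ← List.getD_eq_getElem?_getD]
    simpa using pvFlat_getD_even (chr.map pvPair) 0 (by simp; omega)

-- the common per-chromosome contribution both ports realize
def pvRangeMap (chr : List Int) : List (Int × Int) :=
  (List.range (chr.map pvPair).length).map (fun j =>
    (((chr.map pvPair).getD j (0, 0)).2,
     ((chr.map pvPair).getD ((j + 1) % (chr.map pvPair).length) (0, 0)).1))

-- one chromosome contributes edges ++ pvRangeMap chr in port A
lemma pv_inner_eq (edges : List (Int × Int)) (chr : List Int) :
    (PySem.List.pyRange 1 ((chr.length : Int) + 1) 1).foldl (fun es j =>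
        es ++ [(PySem.List.pyGetD ([0] ++ chromosome_to_cycle chr ++ (chromosome_to_cycle chr).take 1) (2 * j) 0,
                PySem.List.pyGetD ([0] ++ chromosome_to_cycle chr ++ (chromosome_to_cycle chr).take 1) (2 * j + 1) 0)]) edges
    = edges ++ pvRangeMap chr := by
  rw [PySem.List.foldl_append_singleton_eq_map]
  congr 1
  rw [PySem.List.pyRange_one]
  have hlen : ((chr.length : Int) + 1 - 1).toNat = chr.length := by omega
  rw [hlen, List.map_map]
  unfold pvRangeMap
  simp only [List.length_map]
  apply List.map_congr_left
  intro k hk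
  rw [List.mem_range] at hk
  simp only [Function.comp]
  rw [ctc_eq]
  rw [pv_edge_fst chr k hk, pv_edge_snd chr k hk]

-- B's prev-carrying loop produces the zip of each element with its cyclic successor
lemma pv_b_loop (rest : List Int) : ∀ (es : List (Int × Int)) (prev a : Int),
    (let st := rest.foldl (fun (st : List (Int × Int) × Int) cur =>
        (st.1 ++ [(pvTailB st.2, pvHeadB cur)], cur)) (es, prev)
     st.1 ++ [(pvTailB st.2, pvHeadB a)])
    = es ++ ((prev :: rest).zip (rest ++ [a])).map
        (fun pq => ((pvPair pq.1).2, (pvPair pq.2).1)) := by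
  induction rest with
  | nil =>
    intro es prev a
    simp [pvHeadB_eq, pvTailB_eq]
  | cons c t ih =>
    intro es prev a
    simp only [List.foldl_cons]
    rw [ih]
    simp [pvHeadB_eq, pvTailB_eq]

-- the zip form is exactly the range/modulo form
lemma pv_zip_eq_range (a : Int) (rest : List Int) :
    ((a :: rest).zip (rest ++ [a])).map (fun pq => ((pvPair pq.1).2, (pvPair pq.2).1))
    = pvRangeMap (a :: rest) := by
  unfold pvRangeMap
  apply List.ext_getElem
  · simp
  · intro k h1 h2
    have hk : k < rest.length + 1 := by simpa using h2
    rw [List.getElem_map, List.getElem_map, List.getElem_zip, List.getElem_range]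
    have hchr : ∀ (j : ℕ) (hj : j < rest.length + 1),
        ((a :: rest).map pvPair).getD j (0, 0) = pvPair ((a :: rest)[j]'(by simpa using hj)) := by
      intro j hj
      rw [List.getD_eq_getElem _ _ (by simpa using hj), List.getElem_map]
    rw [hchr k hk]
    by_cases hlt : k < rest.length
    · have hmod : (k + 1) % ((a :: rest).map pvPair).length = k + 1 := by
        simp only [List.length_map, List.length_cons]
        exact Nat.mod_eq_of_lt (by omega)
      rw [hmod, hchr (k + 1) (by omega)]
      have hsec : (rest ++ [a])[k]'(by simp; omega) = rest[k]'hlt := by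
        rw [List.getElem_append_left hlt]
      rw [hsec]
      rfl
    · have hk1 : k = rest.length := by omega
      have hmod : (k + 1) % ((a :: rest).map pvPair).length = 0 := by
        simp only [List.length_map, List.length_cons, hk1, Nat.mod_self]
      rw [hmod, hchr 0 (by omega)]
      have hsec : (rest ++ [a])[k]'(by simp; omega) = a := by
        subst hk1
        rw [List.getElem_append_right (le_refl _)]
        simp
      rw [hsec]
      rfl

-- ===== VERDICT (by name: the statement is the Claim_ definition above) =====
theorem colored_edges_spec : Claim_equal_colored_edges := by
  unfold Claim_equal_colored_edges
  intro P _
  unfold Spec_colored_edges colored_edges colored_edges_alt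
  have hA : (fun (edges : List (Int × Int)) (chr : List Int) =>
      let nodes := chromosome_to_cycle chr
      let nodes2 := [0] ++ nodes ++ nodes.take 1
      (PySem.List.pyRange 1 ((chr.length : Int) + 1) 1).foldl (fun es j =>
        es ++ [(PySem.List.pyGetD nodes2 (2 * j) 0, PySem.List.pyGetD nodes2 (2 * j + 1) 0)]) edges)
      = (fun (edges : List (Int × Int)) (chr : List Int) => edges ++ pvRangeMap chr) := by
    funext edges chr
    exact pv_inner_eq edges chr
  have hB : (fun (edges : List (Int × Int)) (chr : List Int) =>
      match chr with
      | [] => edges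
      | first :: rest =>
        let st := rest.foldl (fun (st : List (Int × Int) × Int) cur =>
          (st.1 ++ [(pvTailB st.2, pvHeadB cur)], cur)) (edges, first)
        st.1 ++ [(pvTailB st.2, pvHeadB first)])
      = (fun (edges : List (Int × Int)) (chr : List Int) => edges ++ pvRangeMap chr) := by
    funext edges chr
    match chr with
    | [] => simp [pvRangeMap]
    | first :: rest =>
      simp only []
      rw [pv_b_loop rest edges first first, pv_zip_eq_range]
  rw [hA, hB]
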